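-- pv_equiv track=rewrite | github.com/fas89/forge-cli | fluid_build/providers/local/mocks.py | _translate_snowflake_sql
-- ===== SOURCE A (Python) =====
-- def _translate_snowflake_sql(sql: str) -> str:
--     """
--     Translate Snowflake-specific SQL to DuckDB-compatible SQL.
--
--     Handles common Snowflake patterns:
--     - VARIANT type → JSON
--     - OBJECT_CONSTRUCT → struct
--     - FLATTEN → unnest
--     """
--     # Replace VARIANT with JSON
--     sql = sql.replace("VARIANT", "JSON")
--
--     # Replace Snowflake functions with DuckDB equivalents
--     replacements = {
--         "OBJECT_CONSTRUCT": "struct_pack",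
--         "ARRAY_CONSTRUCT": "list_value",
--         "GET_PATH": "json_extract_path",
--         "PARSE_JSON": "json",
--     }
--
--     for sf_func, duckdb_func in replacements.items():
--         sql = sql.replace(sf_func, duckdb_func)
--
--     return sql
-- ===== SOURCE B (Python) =====
-- def _translate_snowflake_sql(sql: str) -> str:
--     """
--     Translate Snowflake-specific SQL to DuckDB-compatible SQL in a single
--     left-to-right pass: at each position, emit the DuckDB replacement for
--     the first Snowflake token found there, otherwise copy the character.
--     """
--     replacements = {
--         "OBJECT_CONSTRUCT": "struct_pack",
--         "ARRAY_CONSTRUCT": "list_value",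
--         "GET_PATH": "json_extract_path",
--         "PARSE_JSON": "json",
--         "VARIANT": "JSON",
--     }
--     out = []
--     i = 0
--     while i < len(sql):
--         for token, repl in replacements.items():
--             if sql.startswith(token, i):
--                 out.append(repl)
--                 i += len(token)
--                 break
--         else:
--             out.append(sql[i])
--             i += 1
--     return "".join(out)
-- ===== Notes on version B (the rewrite author's own statement) =====
-- stated objective: alternative
-- what changed: Replaces A's five sequential full-string replace passes by a single table-driven left-to-right scan that at each position emits the replacement of the first matching token from the dict, so no pass ever rewrites text produced by another.
-- intended difference: On inputs containing the substring PARSE_VARIANT, A's sequential passes cascade (VARIANT->JSON creates a new PARSE_JSON which the later pass rewrites to json), while B's single pass rewrites only the embedded VARIANT, yielding PARSE_JSON; B's non-cascading replacement is the intended behaviour since PARSE_VARIANT is not one of the translated tokens. — e.g. on _translate_snowflake_sql("PARSE_VARIANT"): A returns "json", B returns "PARSE_JSON"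
import Mathlib
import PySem

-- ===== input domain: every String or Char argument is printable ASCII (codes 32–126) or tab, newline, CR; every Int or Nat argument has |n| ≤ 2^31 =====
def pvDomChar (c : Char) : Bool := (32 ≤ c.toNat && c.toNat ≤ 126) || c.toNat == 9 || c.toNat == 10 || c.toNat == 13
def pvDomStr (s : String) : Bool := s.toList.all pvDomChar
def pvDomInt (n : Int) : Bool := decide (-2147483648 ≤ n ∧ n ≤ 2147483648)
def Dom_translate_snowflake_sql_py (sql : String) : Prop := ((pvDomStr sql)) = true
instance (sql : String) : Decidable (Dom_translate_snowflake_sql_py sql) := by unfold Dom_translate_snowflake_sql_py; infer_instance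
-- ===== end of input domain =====

-- B replaces A's five sequential str.replace passes by one table-driven left-to-right scan;
-- on strings containing "PARSE_VARIANT" the two differ (see D_ below).

-- ===== PORT A =====
def translate_snowflake_sql_py (sql : String) : String :=
  let s1 := PySem.Str.replace sql "VARIANT" "JSON"
  let replacements : List (String × String) :=
    [("OBJECT_CONSTRUCT", "struct_pack"), ("ARRAY_CONSTRUCT", "list_value"),
     ("GET_PATH", "json_extract_path"), ("PARSE_JSON", "json")]
  replacements.foldl (fun s kv => PySem.Str.replace s kv.1 kv.2) s1

-- ===== PORT B =====
-- Source B's replacements dict, in insertion order, as (token, replacement) char lists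
def pvTable : List (List Char × List Char) :=
  [("OBJECT_CONSTRUCT".toList, "struct_pack".toList),
   ("ARRAY_CONSTRUCT".toList, "list_value".toList),
   ("GET_PATH".toList, "json_extract_path".toList),
   ("PARSE_JSON".toList, "json".toList),
   ("VARIANT".toList, "JSON".toList)]

lemma pvTable_key_pos : ∀ kv ∈ pvTable, 1 ≤ kv.1.length := by decide

-- Source B's while loop: at each position, the inner for-loop is `find?` over the table
def pvScan : List Char → List Char
  | [] => []
  | c :: t =>
    match h : pvTable.find? (fun kv => PySem.Chars.startswith (c :: t) kv.1) with
    | some kv => kv.2 ++ pvScan ((c :: t).drop kv.1.length)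
    | none => c :: pvScan t
  termination_by l => l.length
  decreasing_by
  · have hm := pvTable_key_pos _ (List.mem_of_find?_eq_some h)
    simp [List.length_drop]; omega
  · simp

def translate_snowflake_sql_py_alt (sql : String) : String :=
  String.ofList (pvScan sql.toList)

-- ===== PRECONDITION & SPEC =====
-- On inputs containing the substring "PARSE_VARIANT", A's sequential passes cascade
-- (VARIANT→JSON creates a new PARSE_JSON which the later pass rewrites to json), while
-- B's single pass rewrites only the embedded VARIANT, yielding PARSE_JSON; B's
-- non-cascading replacement is the intended behaviour since PARSE_VARIANT is not one
-- of the translated tokens and no pass should rewrite text produced by another pass.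
def D_translate_snowflake_sql_py (sql : String) : Prop :=
  PySem.Str.isIn "PARSE_VARIANT" sql = true
instance (sql : String) : Decidable (D_translate_snowflake_sql_py sql) := by
  unfold D_translate_snowflake_sql_py; infer_instance

def Spec_translate_snowflake_sql_py (sql : String) (out : String) : Prop :=
  ¬ D_translate_snowflake_sql_py sql → out = translate_snowflake_sql_py_alt sql
instance (sql : String) (out : String) : Decidable (Spec_translate_snowflake_sql_py sql out) := by
  unfold Spec_translate_snowflake_sql_py; infer_instance

def pvDiffWitness_translate_snowflake_sql_py : String := "PARSE_VARIANT"
def pvDiffWitnessOut_translate_snowflake_sql_py : String × String := ("json", "PARSE_JSON")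

-- ===== CLAIM (what is proved, stated in full; the proofs are below) =====
def Claim_unchanged_translate_snowflake_sql_py : Prop := ∀ (sql : String), Dom_translate_snowflake_sql_py sql → Spec_translate_snowflake_sql_py sql (translate_snowflake_sql_py sql)
def Claim_changed_translate_snowflake_sql_py : Prop := Dom_translate_snowflake_sql_py (pvDiffWitness_translate_snowflake_sql_py) ∧ D_translate_snowflake_sql_py (pvDiffWitness_translate_snowflake_sql_py) ∧ translate_snowflake_sql_py (pvDiffWitness_translate_snowflake_sql_py) = pvDiffWitnessOut_translate_snowflake_sql_py.1 ∧ translate_snowflake_sql_py_alt (pvDiffWitness_translate_snowflake_sql_py) = pvDiffWitnessOut_translate_snowflake_sql_py.2 ∧ pvDiffWitnessOut_translate_snowflake_sql_py.1 ≠ pvDiffWitnessOut_translate_snowflake_sql_py.2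

def Claim_exact_translate_snowflake_sql_py : Prop := ∀ (sql : String), Dom_translate_snowflake_sql_py sql → D_translate_snowflake_sql_py sql → translate_snowflake_sql_py sql ≠ translate_snowflake_sql_py_alt sql

-- ===== LEMMAS AND PROOFS =====

-- clean structural form of Python str.replace (PySem.Chars.replace) for a nonempty pattern
def pvRep (p r : List Char) : List Char → List Char
  | [] => []
  | c :: t =>
    if p.isPrefixOf (c :: t) = true then r ++ pvRep p r (List.drop (p.length - 1) t)
    else c :: pvRep p r t
  termination_by l => l.length
  decreasing_by all_goals simp [List.length_drop]

lemma pvRep_nil' (p r : List Char) : pvRep p r [] = [] := by rw [pvRep]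

lemma pvRep_cons (p r : List Char) (c : Char) (t : List Char) :
    pvRep p r (c :: t) =
      if p.isPrefixOf (c :: t) = true then r ++ pvRep p r (List.drop (p.length - 1) t)
      else c :: pvRep p r t := by rw [pvRep]

lemma pvRep_neg {p : List Char} (r : List Char) {c : Char} {t : List Char}
    (h : ¬ p <+: (c :: t)) : pvRep p r (c :: t) = c :: pvRep p r t := by
  rw [pvRep_cons, if_neg (by simpa using h)]

lemma pvRep_pos' {p : List Char} (r : List Char) {t : List Char}
    (hp : p ≠ []) (h : p <+: t) :
    pvRep p r t = r ++ pvRep p r (t.drop p.length) := by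
  cases t with
  | nil =>
    cases p with
    | nil => exact absurd rfl hp
    | cons a as => simp at h
  | cons c t =>
    rw [pvRep_cons, if_pos (by simpa using h)]
    cases p with
    | nil => exact absurd rfl hp
    | cons a as => simp [List.drop_succ_cons]

lemma pvGo_spec (old new : List Char) (hold : old ≠ []) :
    ∀ (fuel : Nat) (l acc : List Char), l.length ≤ fuel →
      PySem.Chars.replace.go old new fuel l acc = acc.reverse ++ pvRep old new l := by
  intro fuel
  induction fuel with
  | zero =>
    intro l acc hl
    have hnil : l = [] := List.eq_nil_of_length_eq_zero (Nat.le_zero.mp hl)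
    subst hnil
    rw [PySem.Chars.replace.go.eq_def]
    simp [pvRep_nil']
  | succ f ih =>
    intro l acc hl
    cases l with
    | nil => rw [PySem.Chars.replace.go.eq_def]; simp [pvRep_nil']
    | cons c t =>
      rw [PySem.Chars.replace.go.eq_def]
      by_cases hm : old.isPrefixOf (c :: t) = true
      · simp only [hm, if_true]
        have hlen : (List.drop old.length (c :: t)).length ≤ f := by
          have h1 : 1 ≤ old.length := by
            cases old with
            | nil => exact absurd rfl hold
            | cons _ _ => simp
          simp only [List.length_drop, List.length_cons]
          simp only [List.length_cons] at hl
          omega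
        rw [ih _ _ hlen]
        have e := pvRep_pos' (t := c :: t) new hold (by simpa using hm)
        rw [e]
        simp
      · simp only [hm, if_false]
        have hlen : t.length ≤ f := by simp only [List.length_cons] at hl; omega
        rw [ih _ _ hlen, pvRep_neg new (by simpa using hm)]
        simp

lemma pvReplace_eq (s old new : List Char) (hold : old ≠ []) :
    PySem.Chars.replace s old new = pvRep old new s := by
  have hne : old.isEmpty = false := by
    cases old with
    | nil => exact absurd rfl hold
    | cons _ _ => rfl
  rw [PySem.Chars.replace, hne]
  simp only [Bool.false_eq_true, if_false]
  simpa using pvGo_spec old new hold s.length s [] le_rfl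

-- the A-side chain of the five replaces, on lists
def pvChain (l : List Char) : List Char :=
  pvRep "PARSE_JSON".toList "json".toList
    (pvRep "GET_PATH".toList "json_extract_path".toList
      (pvRep "ARRAY_CONSTRUCT".toList "list_value".toList
        (pvRep "OBJECT_CONSTRUCT".toList "struct_pack".toList
          (pvRep "VARIANT".toList "JSON".toList l))))

-- string-literal ↔ char-list normalisations
lemma ePV : "PARSE_VARIANT".toList = ['P','A','R','S','E','_','V','A','R','I','A','N','T'] := by decide
lemma eOC : "OBJECT_CONSTRUCT".toList = ['O','B','J','E','C','T','_','C','O','N','S','T','R','U','C','T'] := by decide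
lemma eAC : "ARRAY_CONSTRUCT".toList = ['A','R','R','A','Y','_','C','O','N','S','T','R','U','C','T'] := by decide
lemma eGP : "GET_PATH".toList = ['G','E','T','_','P','A','T','H'] := by decide
lemma ePJ : "PARSE_JSON".toList = ['P','A','R','S','E','_','J','S','O','N'] := by decide
lemma eV : "VARIANT".toList = ['V','A','R','I','A','N','T'] := by decide
lemma eJ : "JSON".toList = ['J','S','O','N'] := by decide
lemma ej : "json".toList = ['j','s','o','n'] := by decide
lemma eSP : "struct_pack".toList = ['s','t','r','u','c','t','_','p','a','c','k'] := by decide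
lemma eLV : "list_value".toList = ['l','i','s','t','_','v','a','l','u','e'] := by decide
lemma eJEP : "json_extract_path".toList = ['j','s','o','n','_','e','x','t','r','a','c','t','_','p','a','t','h'] := by decide

-- distribution of the chain over a matched token at the front
lemma chain_OC (t : List Char) :
    pvChain ("OBJECT_CONSTRUCT".toList ++ t) = "struct_pack".toList ++ pvChain t := by
  simp [pvChain, pvRep_cons, List.isPrefixOf, List.drop,
    ePV, eOC, eAC, eGP, ePJ, eV, eJ, ej, eSP, eLV, eJEP]

lemma chain_AC (t : List Char) :
    pvChain ("ARRAY_CONSTRUCT".toList ++ t) = "list_value".toList ++ pvChain t := by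
  simp [pvChain, pvRep_cons, List.isPrefixOf, List.drop,
    ePV, eOC, eAC, eGP, ePJ, eV, eJ, ej, eSP, eLV, eJEP]

lemma chain_GP (t : List Char) :
    pvChain ("GET_PATH".toList ++ t) = "json_extract_path".toList ++ pvChain t := by
  simp [pvChain, pvRep_cons, List.isPrefixOf, List.drop,
    ePV, eOC, eAC, eGP, ePJ, eV, eJ, ej, eSP, eLV, eJEP]

lemma chain_PJ (t : List Char) :
    pvChain ("PARSE_JSON".toList ++ t) = "json".toList ++ pvChain t := by
  simp [pvChain, pvRep_cons, List.isPrefixOf, List.drop,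
    ePV, eOC, eAC, eGP, ePJ, eV, eJ, ej, eSP, eLV, eJEP]

lemma chain_V (t : List Char) :
    pvChain ("VARIANT".toList ++ t) = "JSON".toList ++ pvChain t := by
  simp [pvChain, pvRep_cons, List.isPrefixOf, List.drop,
    ePV, eOC, eAC, eGP, ePJ, eV, eJ, ej, eSP, eLV, eJEP]

-- scan distribution over a matched token at the front
lemma scan_OC (t : List Char) :
    pvScan ("OBJECT_CONSTRUCT".toList ++ t) = "struct_pack".toList ++ pvScan t := by
  have hf : pvTable.find? (fun kv => PySem.Chars.startswith ("OBJECT_CONSTRUCT".toList ++ t) kv.1)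
      = some ("OBJECT_CONSTRUCT".toList, "struct_pack".toList) := by
    simp [pvTable, List.find?, PySem.Chars.startswith, List.isPrefixOf, eOC, eAC, eGP, ePJ, eV]
  simp only [eOC, List.cons_append, List.nil_append] at hf ⊢
  rw [pvScan]
  split
  · next kv heq =>
      rw [hf] at heq
      cases heq
      simp [List.drop]
  · next heq => rw [hf] at heq; cases heq

lemma scan_AC (t : List Char) :
    pvScan ("ARRAY_CONSTRUCT".toList ++ t) = "list_value".toList ++ pvScan t := by
  have hf : pvTable.find? (fun kv => PySem.Chars.startswith ("ARRAY_CONSTRUCT".toList ++ t) kv.1)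
      = some ("ARRAY_CONSTRUCT".toList, "list_value".toList) := by
    simp [pvTable, List.find?, PySem.Chars.startswith, List.isPrefixOf, eOC, eAC, eGP, ePJ, eV]
  simp only [eAC, List.cons_append, List.nil_append] at hf ⊢
  rw [pvScan]
  split
  · next kv heq =>
      rw [hf] at heq
      cases heq
      simp [List.drop]
  · next heq => rw [hf] at heq; cases heq

lemma scan_GP (t : List Char) :
    pvScan ("GET_PATH".toList ++ t) = "json_extract_path".toList ++ pvScan t := by
  have hf : pvTable.find? (fun kv => PySem.Chars.startswith ("GET_PATH".toList ++ t) kv.1)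
      = some ("GET_PATH".toList, "json_extract_path".toList) := by
    simp [pvTable, List.find?, PySem.Chars.startswith, List.isPrefixOf, eOC, eAC, eGP, ePJ, eV]
  simp only [eGP, List.cons_append, List.nil_append] at hf ⊢
  rw [pvScan]
  split
  · next kv heq =>
      rw [hf] at heq
      cases heq
      simp [List.drop]
  · next heq => rw [hf] at heq; cases heq

lemma scan_PJ (t : List Char) :
    pvScan ("PARSE_JSON".toList ++ t) = "json".toList ++ pvScan t := by
  have hf : pvTable.find? (fun kv => PySem.Chars.startswith ("PARSE_JSON".toList ++ t) kv.1)
      = some ("PARSE_JSON".toList, "json".toList) := by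
    simp [pvTable, List.find?, PySem.Chars.startswith, List.isPrefixOf, eOC, eAC, eGP, ePJ, eV]
  simp only [ePJ, List.cons_append, List.nil_append] at hf ⊢
  rw [pvScan]
  split
  · next kv heq =>
      rw [hf] at heq
      cases heq
      simp [List.drop]
  · next heq => rw [hf] at heq; cases heq

lemma scan_V (t : List Char) :
    pvScan ("VARIANT".toList ++ t) = "JSON".toList ++ pvScan t := by
  have hf : pvTable.find? (fun kv => PySem.Chars.startswith ("VARIANT".toList ++ t) kv.1)
      = some ("VARIANT".toList, "JSON".toList) := by
    simp [pvTable, List.find?, PySem.Chars.startswith, List.isPrefixOf, eOC, eAC, eGP, ePJ, eV]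
  simp only [eV, List.cons_append, List.nil_append] at hf ⊢
  rw [pvScan]
  split
  · next kv heq =>
      rw [hf] at heq
      cases heq
      simp [List.drop]
  · next heq => rw [hf] at heq; cases heq

lemma scan_cons (c : Char) (t : List Char)
    (h2 : ¬ ("OBJECT_CONSTRUCT".toList <+: (c :: t)))
    (h3 : ¬ ("ARRAY_CONSTRUCT".toList <+: (c :: t)))
    (h4 : ¬ ("GET_PATH".toList <+: (c :: t)))
    (h5 : ¬ ("PARSE_JSON".toList <+: (c :: t)))
    (h6 : ¬ ("VARIANT".toList <+: (c :: t))) :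
    pvScan (c :: t) = c :: pvScan t := by
  have hf : pvTable.find? (fun kv => PySem.Chars.startswith (c :: t) kv.1) = none := by
    rw [List.find?_eq_none]
    intro kv hkv
    simp only [pvTable, List.mem_cons, List.mem_singleton] at hkv
    rcases hkv with h | h | h | h | h | h
    all_goals first
      | (subst h; simp only [PySem.Chars.startswith_iff]; intro hx
         first | exact h2 hx | exact h3 hx | exact h4 hx | exact h5 hx | exact h6 hx)
      | simp at h
  rw [pvScan]
  split
  · next kv heq => rw [hf] at heq; cases heq
  · next => rfl

-- "no creation at the front": a later pattern q matching the output of an earlier replace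
-- must already match its input, provided every suffix of q mismatches r inside the overlap
lemma pvPrefix_getElem? {p L : List Char} (h : p <+: L)
    {i : Nat} (hi : i < p.length) : L[i]? = p[i]? := by
  obtain ⟨s, rfl⟩ := h
  exact List.getElem?_append_left hi

lemma pvTransfer (p r q : List Char) (hp : p ≠ [])
    (hC1 : ∀ k, k < q.length → ∃ i, i < q.length - k ∧ i < r.length ∧ q[k+i]? ≠ r[i]?) :
    ∀ (n : Nat) (t : List Char), t.length ≤ n → ∀ k,
      (q.drop k) <+: (pvRep p r t) → (q.drop k) <+: t := by
  intro n
  induction n with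
  | zero =>
    intro t ht k h
    have hnil : t = [] := List.eq_nil_of_length_eq_zero (Nat.le_zero.mp ht)
    subst hnil
    rw [pvRep_nil'] at h
    exact h
  | succ m ih =>
    intro t ht k h
    by_cases hkc : q.length ≤ k
    · simp [List.drop_eq_nil_of_le hkc]
    have hk : k < q.length := by omega
    cases t with
    | nil => rw [pvRep_nil'] at h; exact h
    | cons c t' =>
      by_cases hm : p <+: (c :: t')
      · exfalso
        rw [pvRep_pos' r hp hm] at h
        obtain ⟨i, hi1, hi2, hne⟩ := hC1 k hk
        have hi' : i < (q.drop k).length := by simp [List.length_drop]; omega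
        have h1 := pvPrefix_getElem? h hi'
        rw [List.getElem?_append_left hi2] at h1
        rw [List.getElem?_drop] at h1
        exact hne h1.symm
      · rw [pvRep_neg r hm] at h
        rw [List.drop_eq_getElem_cons hk] at h ⊢
        rw [List.cons_prefix_cons] at h ⊢
        refine ⟨h.1, ?_⟩
        exact ih t' (by simp only [List.length_cons] at ht; omega) (k+1) h.2

-- the one genuinely cascading pair: PARSE_JSON over the VARIANT→JSON pass; needs that
-- PARSE_VARIANT does not match the input at the same position
lemma pvTransferPJV :
    ∀ (n : Nat) (t : List Char), t.length ≤ n → ∀ k, k ≤ 10 →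
      (k ≤ 6 → ¬ (("PARSE_VARIANT".toList.drop k) <+: t)) →
      (("PARSE_JSON".toList.drop k) <+: (pvRep "VARIANT".toList "JSON".toList t)) →
      (("PARSE_JSON".toList.drop k) <+: t) := by
  intro n
  induction n with
  | zero =>
    intro t ht k _ _ h
    have hnil : t = [] := List.eq_nil_of_length_eq_zero (Nat.le_zero.mp ht)
    subst hnil
    rw [pvRep_nil'] at h
    exact h
  | succ m ih =>
    intro t ht k hk10 hh h
    by_cases hkc : 10 ≤ k
    · have hEq : k = 10 := le_antisymm hk10 hkc
      subst hEq
      simp [ePJ]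
    have hk : k < 10 := by omega
    cases t with
    | nil => rw [pvRep_nil'] at h; exact h
    | cons c t' =>
      have hkPJ : k < ("PARSE_JSON".toList).length := by rw [ePJ]; simpa using hk
      by_cases hm : ("VARIANT".toList) <+: (c :: t')
      · exfalso
        by_cases hk6 : k = 6
        · subst hk6
          apply hh (by omega)
          rw [show ("PARSE_VARIANT".toList.drop 6) = "VARIANT".toList by decide]
          exact hm
        · have hC : ∃ i, i < 10 - k ∧ i < 4 ∧
              ("PARSE_JSON".toList)[k+i]? ≠ ("JSON".toList)[i]? := by
            have hd : ∀ k', k' < 10 → k' ≠ 6 → ∃ i, i < 10 - k' ∧ i < 4 ∧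
                ("PARSE_JSON".toList)[k'+i]? ≠ ("JSON".toList)[i]? := by decide
            exact hd k hk hk6
          rw [pvRep_pos' _ (by decide) hm] at h
          obtain ⟨i, hi1, hi2, hne⟩ := hC
          have hi' : i < ("PARSE_JSON".toList.drop k).length := by
            simp [List.length_drop, ePJ]; omega
          have h1 := pvPrefix_getElem? h hi'
          have hi2' : i < ("JSON".toList).length := by rw [eJ]; simpa using hi2
          rw [List.getElem?_append_left hi2'] at h1
          rw [List.getElem?_drop] at h1
          exact hne h1.symm
      · rw [pvRep_neg _ hm] at h
        rw [List.drop_eq_getElem_cons hkPJ] at h ⊢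
        rw [List.cons_prefix_cons] at h ⊢
        refine ⟨h.1, ?_⟩
        have hkPV : k < ("PARSE_VARIANT".toList).length := by rw [ePV]; simp; omega
        have hh' : k + 1 ≤ 6 → ¬ (("PARSE_VARIANT".toList.drop (k+1)) <+: t') := by
          intro hk16 hcon
          apply hh (by omega)
          rw [List.drop_eq_getElem_cons hkPV, List.cons_prefix_cons]
          constructor
          · have heq : ∀ k', (hk' : k' < 6) → ("PARSE_VARIANT".toList)[k']? = ("PARSE_JSON".toList)[k']? := by decide
            have h2 := heq k (by omega)
            rw [List.getElem?_eq_getElem hkPV, List.getElem?_eq_getElem hkPJ] at h2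
            rw [Option.some_inj.mp h2]
            exact h.1
          · exact hcon
        exact ih t' (by simp only [List.length_cons] at ht; omega) (k+1) (by omega) hh' h.2

lemma chain_cons (c : Char) (t : List Char)
    (h1 : ¬ ("PARSE_VARIANT".toList <+: (c :: t)))
    (h2 : ¬ ("OBJECT_CONSTRUCT".toList <+: (c :: t)))
    (h3 : ¬ ("ARRAY_CONSTRUCT".toList <+: (c :: t)))
    (h4 : ¬ ("GET_PATH".toList <+: (c :: t)))
    (h5 : ¬ ("PARSE_JSON".toList <+: (c :: t)))
    (h6 : ¬ ("VARIANT".toList <+: (c :: t))) :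
    pvChain (c :: t) = c :: pvChain t := by
  have tOCV := pvTransfer "VARIANT".toList "JSON".toList "OBJECT_CONSTRUCT".toList (by decide) (by decide)
  have tACV := pvTransfer "VARIANT".toList "JSON".toList "ARRAY_CONSTRUCT".toList (by decide) (by decide)
  have tACO := pvTransfer "OBJECT_CONSTRUCT".toList "struct_pack".toList "ARRAY_CONSTRUCT".toList (by decide) (by decide)
  have tGPV := pvTransfer "VARIANT".toList "JSON".toList "GET_PATH".toList (by decide) (by decide)
  have tGPO := pvTransfer "OBJECT_CONSTRUCT".toList "struct_pack".toList "GET_PATH".toList (by decide) (by decide)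
  have tGPA := pvTransfer "ARRAY_CONSTRUCT".toList "list_value".toList "GET_PATH".toList (by decide) (by decide)
  have tPJO := pvTransfer "OBJECT_CONSTRUCT".toList "struct_pack".toList "PARSE_JSON".toList (by decide) (by decide)
  have tPJA := pvTransfer "ARRAY_CONSTRUCT".toList "list_value".toList "PARSE_JSON".toList (by decide) (by decide)
  have tPJG := pvTransfer "GET_PATH".toList "json_extract_path".toList "PARSE_JSON".toList (by decide) (by decide)
  -- layer V
  have eVl : pvRep "VARIANT".toList "JSON".toList (c :: t)
      = c :: pvRep "VARIANT".toList "JSON".toList t := pvRep_neg _ h6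
  -- layer OC
  have hOC : ¬ ("OBJECT_CONSTRUCT".toList <+: pvRep "VARIANT".toList "JSON".toList (c :: t)) := by
    intro hx
    exact h2 (by simpa using tOCV _ (c :: t) le_rfl 0 (by simpa using hx))
  have eOCl : pvRep "OBJECT_CONSTRUCT".toList "struct_pack".toList (pvRep "VARIANT".toList "JSON".toList (c :: t))
      = c :: pvRep "OBJECT_CONSTRUCT".toList "struct_pack".toList (pvRep "VARIANT".toList "JSON".toList t) := by
    rw [eVl] at hOC ⊢
    exact pvRep_neg _ hOC
  -- layer AC
  have hAC : ¬ ("ARRAY_CONSTRUCT".toList <+: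
      pvRep "OBJECT_CONSTRUCT".toList "struct_pack".toList (pvRep "VARIANT".toList "JSON".toList (c :: t))) := by
    intro hx
    have hx1 := tACO _ _ le_rfl 0 (by simpa using hx)
    have hx2 := tACV _ (c :: t) le_rfl 0 (by simpa using hx1)
    exact h3 (by simpa using hx2)
  have eACl : pvRep "ARRAY_CONSTRUCT".toList "list_value".toList
        (pvRep "OBJECT_CONSTRUCT".toList "struct_pack".toList (pvRep "VARIANT".toList "JSON".toList (c :: t)))
      = c :: pvRep "ARRAY_CONSTRUCT".toList "list_value".toList
        (pvRep "OBJECT_CONSTRUCT".toList "struct_pack".toList (pvRep "VARIANT".toList "JSON".toList t)) := by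
    rw [eOCl] at hAC ⊢
    exact pvRep_neg _ hAC
  -- layer GP
  have hGP : ¬ ("GET_PATH".toList <+:
      pvRep "ARRAY_CONSTRUCT".toList "list_value".toList
        (pvRep "OBJECT_CONSTRUCT".toList "struct_pack".toList (pvRep "VARIANT".toList "JSON".toList (c :: t)))) := by
    intro hx
    have hx1 := tGPA _ _ le_rfl 0 (by simpa using hx)
    have hx2 := tGPO _ _ le_rfl 0 (by simpa using hx1)
    have hx3 := tGPV _ (c :: t) le_rfl 0 (by simpa using hx2)
    exact h4 (by simpa using hx3)
  have eGPl : pvRep "GET_PATH".toList "json_extract_path".toList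
        (pvRep "ARRAY_CONSTRUCT".toList "list_value".toList
          (pvRep "OBJECT_CONSTRUCT".toList "struct_pack".toList (pvRep "VARIANT".toList "JSON".toList (c :: t))))
      = c :: pvRep "GET_PATH".toList "json_extract_path".toList
        (pvRep "ARRAY_CONSTRUCT".toList "list_value".toList
          (pvRep "OBJECT_CONSTRUCT".toList "struct_pack".toList (pvRep "VARIANT".toList "JSON".toList t))) := by
    rw [eACl] at hGP ⊢
    exact pvRep_neg _ hGP
  -- layer PJ
  have hPJ : ¬ ("PARSE_JSON".toList <+:
      pvRep "GET_PATH".toList "json_extract_path".toList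
        (pvRep "ARRAY_CONSTRUCT".toList "list_value".toList
          (pvRep "OBJECT_CONSTRUCT".toList "struct_pack".toList (pvRep "VARIANT".toList "JSON".toList (c :: t))))) := by
    intro hx
    have hx1 := tPJG _ _ le_rfl 0 (by simpa using hx)
    have hx2 := tPJA _ _ le_rfl 0 (by simpa using hx1)
    have hx3 := tPJO _ _ le_rfl 0 (by simpa using hx2)
    have hx4 := pvTransferPJV (c :: t).length (c :: t) le_rfl 0 (by omega)
      (fun _ => by simpa using h1) (by simpa using hx3)
    exact h5 (by simpa using hx4)
  simp only [pvChain]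
  rw [eGPl] at hPJ ⊢
  exact pvRep_neg _ hPJ

lemma pvScan_eq_chain : ∀ (n : Nat) (l : List Char), l.length ≤ n →
    ¬ ("PARSE_VARIANT".toList <:+: l) → pvScan l = pvChain l := by
  intro n
  induction n with
  | zero =>
    intro l hl _
    have hnil : l = [] := List.eq_nil_of_length_eq_zero (Nat.le_zero.mp hl)
    subst hnil
    simp [pvScan, pvChain, pvRep_nil']
  | succ m ih =>
    intro l hl hNo
    cases l with
    | nil => simp [pvScan, pvChain, pvRep_nil']
    | cons c t =>
      simp only [List.length_cons] at hl
      have hNoSuf : ∀ s : List Char, s <:+ (c :: t) → ¬ ("PARSE_VARIANT".toList <:+: s) := by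
        intro s hs hcon
        exact hNo (hcon.trans hs.isInfix)
      by_cases k2 : ("OBJECT_CONSTRUCT".toList) <+: (c :: t)
      · obtain ⟨s, hs⟩ := k2
        have hlen := congrArg List.length hs
        simp [eOC] at hlen
        have hNs := hNoSuf s ⟨"OBJECT_CONSTRUCT".toList, hs⟩
        rw [← hs, scan_OC, chain_OC, ih s (by omega) hNs]
      by_cases k3 : ("ARRAY_CONSTRUCT".toList) <+: (c :: t)
      · obtain ⟨s, hs⟩ := k3
        have hlen := congrArg List.length hs
        simp [eAC] at hlen
        have hNs := hNoSuf s ⟨"ARRAY_CONSTRUCT".toList, hs⟩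
        rw [← hs, scan_AC, chain_AC, ih s (by omega) hNs]
      by_cases k4 : ("GET_PATH".toList) <+: (c :: t)
      · obtain ⟨s, hs⟩ := k4
        have hlen := congrArg List.length hs
        simp [eGP] at hlen
        have hNs := hNoSuf s ⟨"GET_PATH".toList, hs⟩
        rw [← hs, scan_GP, chain_GP, ih s (by omega) hNs]
      by_cases k5 : ("PARSE_JSON".toList) <+: (c :: t)
      · obtain ⟨s, hs⟩ := k5
        have hlen := congrArg List.length hs
        simp [ePJ] at hlen
        have hNs := hNoSuf s ⟨"PARSE_JSON".toList, hs⟩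
        rw [← hs, scan_PJ, chain_PJ, ih s (by omega) hNs]
      by_cases k6 : ("VARIANT".toList) <+: (c :: t)
      · obtain ⟨s, hs⟩ := k6
        have hlen := congrArg List.length hs
        simp [eV] at hlen
        have hNs := hNoSuf s ⟨"VARIANT".toList, hs⟩
        rw [← hs, scan_V, chain_V, ih s (by omega) hNs]
      · have k1 : ¬ ("PARSE_VARIANT".toList <+: (c :: t)) := fun hx => hNo hx.isInfix
        have hNt : ¬ ("PARSE_VARIANT".toList <:+: t) :=
          hNoSuf t (List.suffix_cons c t)
        rw [scan_cons c t k2 k3 k4 k5 k6,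
          chain_cons c t k1 k2 k3 k4 k5 k6,
          ih t (by omega) hNt]

lemma pvA_toList (sql : String) :
    (translate_snowflake_sql_py sql).toList = pvChain sql.toList := by
  simp only [translate_snowflake_sql_py, List.foldl]
  simp only [PySem.Str.toList_replace]
  rw [pvReplace_eq _ _ _ (by decide), pvReplace_eq _ _ _ (by decide),
    pvReplace_eq _ _ _ (by decide), pvReplace_eq _ _ _ (by decide),
    pvReplace_eq _ _ _ (by decide)]
  rfl

lemma pvB_toList (sql : String) :
    (translate_snowflake_sql_py_alt sql).toList = pvScan sql.toList := by
  simp [translate_snowflake_sql_py_alt]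

lemma pvAltWitness :
    translate_snowflake_sql_py_alt "PARSE_VARIANT" = "PARSE_JSON" := by
  apply String.toList_inj.mp
  rw [pvB_toList]
  rw [show ("PARSE_VARIANT".toList) = ['P','A','R','S','E','_'] ++ "VARIANT".toList ++ [] by decide]
  rw [List.append_assoc]
  rw [show (['P','A','R','S','E','_'] : List Char) ++ ("VARIANT".toList ++ []) =
    'P' :: ('A' :: ('R' :: ('S' :: ('E' :: ('_' :: ("VARIANT".toList ++ [])))))) by simp]
  rw [scan_cons _ _ (by decide) (by decide) (by decide) (by decide) (by decide)]
  rw [scan_cons _ _ (by decide) (by decide) (by decide) (by decide) (by decide)]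
  rw [scan_cons _ _ (by decide) (by decide) (by decide) (by decide) (by decide)]
  rw [scan_cons _ _ (by decide) (by decide) (by decide) (by decide) (by decide)]
  rw [scan_cons _ _ (by decide) (by decide) (by decide) (by decide) (by decide)]
  rw [scan_cons _ _ (by decide) (by decide) (by decide) (by decide) (by decide)]
  rw [scan_V]
  rw [show pvScan [] = [] by rw [pvScan]]
  decide

-- infix ↔ some drop has it as a prefix (bridging through PySem's isIn)
lemma pvInfix_iff_drop (sub s : List Char) : sub <:+: s ↔ ∃ j, sub <+: s.drop j := by
  rw [← PySem.Chars.isIn_iff_infix, ← PySem.Chars.exists_prefix_drop_iff_isIn]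

-- an occurrence of p cannot start inside x when x's characters do not occur in p
lemma pvDisjointAppend : ∀ (x y p : List Char), (∀ a ∈ x, a ∉ p) → p ≠ [] →
    p <:+: (x ++ y) → p <:+: y := by
  intro x
  induction x with
  | nil => intro y p _ _ h; simpa using h
  | cons a x ih =>
    intro y p hd hp h
    rcases List.infix_cons_iff.mp h with hpre | hinf
    · exfalso
      cases p with
      | nil => exact hp rfl
      | cons q qs =>
        have hqa : a = q := (List.cons_prefix_cons.mp hpre).1.symm
        exact hd a (List.mem_cons_self) (by rw [hqa]; exact List.mem_cons_self)
    · exact ih y p (fun b hb => hd b (List.mem_cons_of_mem _ hb)) hp hinf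

-- the final PARSE_JSON→json pass leaves no PARSE_JSON in its output
lemma pvRep_noPJ : ∀ (n : Nat) (l : List Char), l.length ≤ n →
    ¬ ("PARSE_JSON".toList <:+: pvRep "PARSE_JSON".toList "json".toList l) := by
  intro n
  induction n with
  | zero =>
    intro l hl h
    have hnil : l = [] := List.eq_nil_of_length_eq_zero (Nat.le_zero.mp hl)
    subst hnil
    rw [pvRep_nil'] at h
    simp [ePJ] at h
  | succ m ih =>
    intro l hl h
    cases l with
    | nil => rw [pvRep_nil'] at h; simp [ePJ] at h
    | cons c t =>
      simp only [List.length_cons] at hl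
      have tPJ := pvTransfer "PARSE_JSON".toList "json".toList "PARSE_JSON".toList (by decide) (by decide)
      by_cases hm : "PARSE_JSON".toList <+: (c :: t)
      · rw [pvRep_pos' _ (by decide) hm] at h
        have hdisj : ∀ a ∈ "json".toList, a ∉ "PARSE_JSON".toList := by simp
        have hne : "PARSE_JSON".toList ≠ [] := by decide
        have h2 := pvDisjointAppend _ _ _ hdisj hne h
        have hlen : ((c :: t).drop ("PARSE_JSON".toList).length).length ≤ m := by
          simp [List.length_drop, ePJ]; omega
        exact ih _ hlen h2
      · rw [pvRep_neg _ hm] at h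
        rcases List.infix_cons_iff.mp h with hpre | hinf
        · rw [show ("PARSE_JSON".toList) = 'P' :: "PARSE_JSON".toList.drop 1 by decide] at hpre
          obtain ⟨hc, htail⟩ := List.cons_prefix_cons.mp hpre
          have h1 := tPJ t.length t le_rfl 1 htail
          exact hm (by
            rw [show ("PARSE_JSON".toList) = 'P' :: "PARSE_JSON".toList.drop 1 by decide,
              List.cons_prefix_cons]
            exact ⟨hc, h1⟩)
        · exact ih t (by omega) hinf

-- scanning a string starting with PARSE_VARIANT emits PARSE_JSON
lemma scan_PARSE_V (x : List Char) :
    pvScan ("PARSE_VARIANT".toList ++ x) = "PARSE_JSON".toList ++ pvScan x := by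
  rw [show ("PARSE_VARIANT".toList ++ x) =
    'P' :: 'A' :: 'R' :: 'S' :: 'E' :: '_' :: ("VARIANT".toList ++ x) by simp [ePV, eV]]
  rw [scan_cons _ _ (by simp [eOC, List.cons_prefix_cons]) (by simp [eAC, List.cons_prefix_cons])
    (by simp [eGP, List.cons_prefix_cons]) (by simp [ePJ, eV, List.cons_prefix_cons])
    (by simp [eV, List.cons_prefix_cons])]
  rw [scan_cons _ _ (by simp [eOC, List.cons_prefix_cons]) (by simp [eAC, List.cons_prefix_cons])
    (by simp [eGP, List.cons_prefix_cons]) (by simp [ePJ, eV, List.cons_prefix_cons])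
    (by simp [eV, List.cons_prefix_cons])]
  rw [scan_cons _ _ (by simp [eOC, List.cons_prefix_cons]) (by simp [eAC, List.cons_prefix_cons])
    (by simp [eGP, List.cons_prefix_cons]) (by simp [ePJ, eV, List.cons_prefix_cons])
    (by simp [eV, List.cons_prefix_cons])]
  rw [scan_cons _ _ (by simp [eOC, List.cons_prefix_cons]) (by simp [eAC, List.cons_prefix_cons])
    (by simp [eGP, List.cons_prefix_cons]) (by simp [ePJ, eV, List.cons_prefix_cons])
    (by simp [eV, List.cons_prefix_cons])]
  rw [scan_cons _ _ (by simp [eOC, List.cons_prefix_cons]) (by simp [eAC, List.cons_prefix_cons])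
    (by simp [eGP, List.cons_prefix_cons]) (by simp [ePJ, eV, List.cons_prefix_cons])
    (by simp [eV, List.cons_prefix_cons])]
  rw [scan_cons _ _ (by simp [eOC, List.cons_prefix_cons]) (by simp [eAC, List.cons_prefix_cons])
    (by simp [eGP, List.cons_prefix_cons]) (by simp [ePJ, eV, List.cons_prefix_cons])
    (by simp [eV, List.cons_prefix_cons])]
  rw [scan_V]
  simp [ePJ, eJ]

-- no token of the table, cut at a position ≥ 1, aligns with a PARSE_VARIANT occurrence
lemma pvNoOverlap : ∀ kv ∈ pvTable, ∀ i, 1 ≤ i → i < kv.1.length →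
    ¬ ("PARSE_VARIANT".toList <+: kv.1.drop i) ∧ ¬ (kv.1.drop i <+: "PARSE_VARIANT".toList) := by
  decide

-- B's scan keeps a PARSE_JSON in the output whenever the input contains PARSE_VARIANT
lemma pvScan_hasPJ : ∀ (n : Nat) (l : List Char), l.length ≤ n →
    "PARSE_VARIANT".toList <:+: l → "PARSE_JSON".toList <:+: pvScan l := by
  intro n
  induction n with
  | zero =>
    intro l hl h
    have hnil : l = [] := List.eq_nil_of_length_eq_zero (Nat.le_zero.mp hl)
    subst hnil
    simp [ePV] at h
  | succ m ih =>
    intro l hl hPV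
    by_cases hp : "PARSE_VARIANT".toList <+: l
    · obtain ⟨rest, hrest⟩ := hp
      rw [← hrest, scan_PARSE_V]
      exact (List.prefix_append _ _).isInfix
    · cases l with
      | nil => simp [ePV] at hPV
      | cons c t =>
        simp only [List.length_cons] at hl
        have hPVt : "PARSE_VARIANT".toList <:+: t := (List.infix_cons_iff.mp hPV).resolve_left hp
        rcases hfind : pvTable.find? (fun kv => PySem.Chars.startswith (c :: t) kv.1) with _ | kv
        · have hs : pvScan (c :: t) = c :: pvScan t := by
            rw [pvScan]; split
            · next kv heq => rw [hfind] at heq; cases heq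
            · next => rfl
          rw [hs]
          exact (ih t (by omega) hPVt).trans (List.suffix_cons c (pvScan t)).isInfix
        · have hkv : kv ∈ pvTable := List.mem_of_find?_eq_some hfind
          have hpref : kv.1 <+: (c :: t) := by
            have hx := List.find?_some hfind
            exact (PySem.Chars.startswith_iff _ _).mp (by simpa using hx)
          have hs : pvScan (c :: t) = kv.2 ++ pvScan ((c :: t).drop kv.1.length) := by
            rw [pvScan]; split
            · next kv' heq => rw [hfind] at heq; cases heq; rfl
            · next heq => rw [hfind] at heq; cases heq
          obtain ⟨j', hj'⟩ := (pvInfix_iff_drop _ t).mp hPVt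
          have hj : "PARSE_VARIANT".toList <+: (c :: t).drop (j' + 1) := by
            rwa [List.drop_succ_cons]
          by_cases hjL : j' + 1 < kv.1.length
          · exfalso
            obtain ⟨r2, hr2⟩ := hpref
            have hdrop : (c :: t).drop (j' + 1) = kv.1.drop (j' + 1) ++ r2 := by
              rw [← hr2, List.drop_append_of_le_length (by omega)]
            rw [hdrop] at hj
            have htok : kv.1.drop (j' + 1) <+: kv.1.drop (j' + 1) ++ r2 := List.prefix_append _ _
            rcases List.prefix_or_prefix_of_prefix hj htok with hcase | hcase
            · exact (pvNoOverlap kv hkv (j' + 1) (by omega) hjL).1 hcase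
            · exact (pvNoOverlap kv hkv (j' + 1) (by omega) hjL).2 hcase
          · have hrest : "PARSE_VARIANT".toList <+: ((c :: t).drop kv.1.length).drop (j' + 1 - kv.1.length) := by
              rw [List.drop_drop]
              rwa [show kv.1.length + (j' + 1 - kv.1.length) = j' + 1 by omega]
            have hPVrest : "PARSE_VARIANT".toList <:+: (c :: t).drop kv.1.length :=
              (pvInfix_iff_drop _ _).mpr ⟨j' + 1 - kv.1.length, hrest⟩
            have hL1 : 1 ≤ kv.1.length := pvTable_key_pos kv hkv
            have hlen : ((c :: t).drop kv.1.length).length ≤ m := by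
              simp [List.length_drop]; omega
            rw [hs]
            exact (ih _ hlen hPVrest).trans (List.suffix_append kv.2 _).isInfix

-- ===== VERDICT (by name: the statement is the Claim_ definition above) =====
theorem translate_snowflake_sql_py_spec : Claim_unchanged_translate_snowflake_sql_py := by
  intro sql _
  unfold Spec_translate_snowflake_sql_py
  intro hnd
  unfold D_translate_snowflake_sql_py at hnd
  have hnd' : ¬ ("PARSE_VARIANT".toList <:+: sql.toList) :=
    fun hx => hnd ((PySem.Str.isIn_iff_infix _ _).mpr hx)
  apply String.toList_inj.mp
  rw [pvA_toList, pvB_toList, pvScan_eq_chain sql.toList.length sql.toList le_rfl hnd']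

theorem translate_snowflake_sql_py_changed : Claim_changed_translate_snowflake_sql_py := by
  unfold Claim_changed_translate_snowflake_sql_py
  refine ⟨by decide, by decide, by decide, pvAltWitness, by decide⟩

theorem translate_snowflake_sql_py_tight : Claim_exact_translate_snowflake_sql_py := by
  intro sql _ hD hEq
  have hPV : "PARSE_VARIANT".toList <:+: sql.toList :=
    (PySem.Str.isIn_iff_infix _ _).mp hD
  have hB : "PARSE_JSON".toList <:+: pvScan sql.toList :=
    pvScan_hasPJ sql.toList.length sql.toList le_rfl hPV
  have hlists : pvChain sql.toList = pvScan sql.toList := by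
    rw [← pvA_toList, ← pvB_toList, hEq]
  rw [← hlists, pvChain] at hB
  exact pvRep_noPJ _ _ le_rfl hB
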